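-- pv_equiv track=rewrite | github.com/computerphilosopher/BOJ | 02800/2800.pypy3.py | solve
-- ===== SOURCE A (Python) =====
-- def solve(start:str)->list:
--     stack = []
--     ret = []
--     q = [start]
--
--     discovered = {start}
--
--     while len(q):
--
--         s = q.pop(0)
--
--         for i, ch in enumerate(s):
--             if ch == '(':
--                 stack.append(i)
--
--             elif ch == ')':
--                 left = stack.pop(len(stack)-1)
--                 tmp = s[0:left] + s[left+1:i] + s[i+1:len(s)]
--
--                 if tmp not in discovered:
--                     q.append(tmp)
--                     discovered.add(tmp)
--
--     discovered.remove(start)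
--     return sorted(list(discovered))
-- ===== SOURCE B (Python) =====
-- def solve(start: str) -> list:
--     # One stack scan collects the matched pairs; then enumerate every
--     # nonempty subset of pairs and build the string with those indices removed.
--     stack = []
--     pairs = []
--     for i, ch in enumerate(start):
--         if ch == '(':
--             stack.append(i)
--         elif ch == ')':
--             pairs.append((stack.pop(), i))
--     results = set()
--     n = len(pairs)
--     for mask in range(1, 1 << n):
--         removed = set()
--         for k in range(n):
--             if (mask >> k) & 1:
--                 l, r = pairs[k]
--                 removed.add(l)
--                 removed.add(r)
--         results.add(''.join(ch for j, ch in enumerate(start) if j not in removed))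
--     return sorted(results)
-- ===== Notes on version B (the rewrite author's own statement) =====
-- stated objective: alternative
-- what changed: A's BFS worklist that repeatedly rescans each derived string and removes one matched pair per step is replaced by a single stack scan collecting the matched parenthesis pairs of the input followed by direct enumeration of all nonempty subsets of those pairs (bitmask), building each result string in one filtering pass.
import Mathlib
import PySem

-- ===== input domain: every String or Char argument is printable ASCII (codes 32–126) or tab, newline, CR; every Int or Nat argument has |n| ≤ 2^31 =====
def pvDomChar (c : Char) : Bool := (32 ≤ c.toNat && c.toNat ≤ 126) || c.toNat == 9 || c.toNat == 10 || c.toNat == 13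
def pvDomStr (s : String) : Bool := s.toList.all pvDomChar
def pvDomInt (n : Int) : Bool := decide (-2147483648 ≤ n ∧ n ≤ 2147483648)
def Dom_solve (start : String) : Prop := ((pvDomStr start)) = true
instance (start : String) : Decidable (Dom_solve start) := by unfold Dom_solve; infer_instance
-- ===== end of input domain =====

-- B replaces A's BFS worklist over strings by a single stack scan collecting the
-- matched parenthesis pairs followed by direct enumeration of all nonempty subsets
-- of those pairs (objective: alternative algorithm, similar exponential cost).


-- ===== PORT A =====
-- Python str is ported as String (scanned as its List Char); 'stack.append' /
-- 'stack.pop(len(stack)-1)' (push/pop at the right end) is ported as cons/head at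
-- the left end — the same stack discipline; the pop on an empty stack (IndexError,
-- excluded by Pre_) makes the whole computation bail out with none ↦ [].
def solveInner (s : String) : List Char → Nat → List Nat →
    List String → PySem.Set String → Option (List Nat × List String × PySem.Set String)
  | [], _, stack, q, disc => some (stack, q, disc)
  | ch :: rest, i, stack, q, disc =>
    if ch = '(' then solveInner s rest (i+1) (i :: stack) q disc
    else if ch = ')' then
      match stack with
      | [] => none
      | left :: stack' =>
        let cs := s.toList
        let tmp := String.ofList (PySem.List.slice cs (some 0) (some (left : Int)) ++
          PySem.List.slice cs (some ((left : Int) + 1)) (some (i : Int)) ++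
          PySem.List.slice cs (some ((i : Int) + 1)) (some (PySem.List.len cs)))
        if PySem.Set.contains disc tmp then solveInner s rest (i+1) stack' q disc
        else solveInner s rest (i+1) stack' (q ++ [tmp]) (PySem.Set.add disc tmp)
    else solveInner s rest (i+1) stack q disc

-- the 'while len(q)' loop, with a fuel counter proved sufficient under Pre_
def solveLoop : Nat → List Nat → List String → PySem.Set String → Option (PySem.Set String)
  | 0, _, _, _ => none
  | fuel+1, stack, q, disc =>
    match q with
    | [] => some disc
    | s :: q' =>
      match solveInner s s.toList 0 stack q' disc with
      | none => none
      | some (stack', q'', disc') => solveLoop fuel stack' q'' disc'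

def solve (start : String) : List String :=
  match solveLoop (2 ^ start.toList.length + 1) [] [start] (PySem.Set.ofList [start]) with
  | none => []
  | some disc =>
    match PySem.Set.remove? disc start with
    | none => []
    | some disc' => PySem.List.sorted disc' (fun x => x) false

-- ===== PORT B =====
-- one stack scan that collects the matched pairs (left, right); an unmatched ')'
-- (pop of an empty stack, IndexError, excluded by Pre_) bails out with none ↦ []
def altScan : List Char → Nat → List Nat → List (Nat × Nat) → Option (List (Nat × Nat))
  | [], _, _, pairs => some pairs
  | ch :: rest, i, stack, pairs =>
    if ch = '(' then altScan rest (i+1) (i :: stack) pairs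
    else if ch = ')' then
      match stack with
      | [] => none
      | l :: stack' => altScan rest (i+1) stack' (pairs ++ [(l, i)])
    else altScan rest (i+1) stack pairs

-- 'for k, (l, r) in enumerate(pairs): if (mask >> k) & 1: removed.add(l); removed.add(r)'
def altRemoved (mask : Int) : List (Nat × Nat) → Nat → PySem.Set Nat → PySem.Set Nat
  | [], _, rem => rem
  | (l, r) :: rest, k, rem =>
    if PySem.Int.band (mask >>> k) 1 ≠ 0 then
      altRemoved mask rest (k+1) (PySem.Set.add (PySem.Set.add rem l) r)
    else altRemoved mask rest (k+1) rem

-- ''.join(ch for j, ch in enumerate(start) if j not in removed)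
def altJoin : List Char → Nat → PySem.Set Nat → List Char
  | [], _, _ => []
  | c :: rest, j, removed =>
    if PySem.Set.contains removed j then altJoin rest (j+1) removed
    else c :: altJoin rest (j+1) removed

def solve_alt (start : String) : List String :=
  match altScan start.toList 0 [] [] with
  | none => []
  | some pairs =>
    let n := pairs.length
    let results := (PySem.List.pyRange 1 ((1 : Int) <<< n) 1).foldl
      (fun results mask =>
        PySem.Set.add results
          (String.ofList (altJoin start.toList 0 (altRemoved mask pairs 0 PySem.Set.empty))))
      PySem.Set.empty
    PySem.List.sorted results (fun x => x) false

-- ===== PRECONDITION & SPEC =====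
-- Pre_ excludes exactly the inputs where Python A raises IndexError (a ')' with no
-- '(' open before it: stack.pop on an empty stack); Python B raises there as well.
def Pre_solve (start : String) : Prop :=
  ∀ p ∈ start.toList.inits, p.count ')' ≤ p.count '('
instance (start : String) : Decidable (Pre_solve start) := by unfold Pre_solve; infer_instance
def pvWitness_solve : String := "(a)()"

def Spec_solve (start : String) (out : List String) : Prop := out = solve_alt start
instance (start : String) (out : List String) : Decidable (Spec_solve start out) := by
  unfold Spec_solve; infer_instance

-- ===== CLAIM (what is proved, stated in full; the proofs are below) =====
def Claim_equal_solve : Prop :=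
  ∀ (start : String), Dom_solve start → Pre_solve start → Spec_solve start (solve start)

-- ===== LEMMAS AND PROOFS =====

-- semantic model: a "marked" scan of the ORIGINAL character list cs that skips the
-- positions listed in I; stack and emitted pairs carry ORIGINAL indices.
def mscan : List Char → Nat → List Nat → List (Nat × Nat) → List Nat →
    Option (List Nat × List (Nat × Nat))
  | [], _, st, acc, _ => some (st, acc)
  | c :: rest, i, st, acc, I =>
    if i ∈ I then mscan rest (i+1) st acc I
    else if c = '(' then mscan rest (i+1) (i :: st) acc I
    else if c = ')' then
      match st with
      | [] => none
      | l :: st' => mscan rest (i+1) st' (acc ++ [(l, i)]) I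
    else mscan rest (i+1) st acc I

-- cs with the positions in I deleted (position counter starts at i)
def rmv : List Char → Nat → List Nat → List Char
  | [], _, _ => []
  | c :: rest, j, I => if j ∈ I then rmv rest (j+1) I else c :: rmv rest (j+1) I

def sh (I : List Nat) (j : Nat) : Nat := j - I.countP (fun x => x < j)

def marks (S : List (Nat × Nat)) : List Nat := S.flatMap (fun p => [p.1, p.2])


def fS (cs : List Char) (S : List (Nat × Nat)) : String := String.ofList (rmv cs 0 (marks S))

-- ---- basic facts about mscan / rmv / sh / marks ----

theorem marks_append (a b : List (Nat × Nat)) : marks (a ++ b) = marks a ++ marks b := by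
  simp [marks]

theorem mscan_acc (rest : List Char) : ∀ (i : Nat) (st : List Nat) (acc : List (Nat × Nat))
    (I : List Nat), mscan rest i st acc I = (mscan rest i st [] I).map (fun r => (r.1, acc ++ r.2)) := by
  induction rest with
  | nil => intro i st acc I; simp [mscan]
  | cons c rest ih =>
    intro i st acc I
    simp only [mscan]
    by_cases hI : i ∈ I
    · simp only [hI, if_true]
      exact ih (i+1) st acc I
    · by_cases hc : c = '('
      · simp only [hI, hc, if_true, if_false]
        exact ih (i+1) (i :: st) acc I
      · by_cases hc2 : c = ')'
        · simp only [hI, hc2, if_true, if_false]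
          match st with
          | [] => rfl
          | l :: st' =>
            simp only
            rw [ih (i+1) st' (acc ++ [(l, i)]) I, ih (i+1) st' ([] ++ [(l, i)]) I]
            cases mscan rest (i+1) st' [] I with
            | none => rfl
            | some r => simp
        · simp only [hI, hc, hc2, if_false]
          exact ih (i+1) st acc I

theorem mscan_congr (rest : List Char) : ∀ (i : Nat) (st : List Nat) (acc : List (Nat × Nat))
    (I I' : List Nat), (∀ x, i ≤ x → (x ∈ I ↔ x ∈ I')) →
    mscan rest i st acc I = mscan rest i st acc I' := by
  induction rest with
  | nil => intro i st acc I I' _; rfl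
  | cons c rest ih =>
    intro i st acc I I' h
    have hii : i ∈ I ↔ i ∈ I' := h i le_rfl
    have hnext : ∀ x, i + 1 ≤ x → (x ∈ I ↔ x ∈ I') := fun x hx => h x (by omega)
    simp only [mscan]
    by_cases hI : i ∈ I
    · simp [hI, hii.mp hI, ih _ _ _ _ _ hnext]
    · have hI' : i ∉ I' := fun hmem => hI (hii.mpr hmem)
      by_cases hc : c = '('
      · simp [hI, hI', hc, ih _ _ _ _ _ hnext]
      · by_cases hc2 : c = ')'
        · simp only [hI, hI', hc2, if_false, if_true]
          match st with
          | [] => rfl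
          | l :: st' => simp [ih _ _ _ _ _ hnext]
        · simp [hI, hI', hc, hc2, ih _ _ _ _ _ hnext]

theorem rmv_congr (rest : List Char) : ∀ (i : Nat) (I I' : List Nat),
    (∀ x, i ≤ x → (x ∈ I ↔ x ∈ I')) → rmv rest i I = rmv rest i I' := by
  induction rest with
  | nil => intro i I I' _; rfl
  | cons c rest ih =>
    intro i I I' h
    have hii : i ∈ I ↔ i ∈ I' := h i le_rfl
    have hnext : ∀ x, i + 1 ≤ x → (x ∈ I ↔ x ∈ I') := fun x hx => h x (by omega)
    by_cases hI : i ∈ I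
    · simp [rmv, hI, hii.mp hI, ih _ _ _ hnext]
    · have hI' : i ∉ I' := fun hmem => hI (hii.mpr hmem)
      simp [rmv, hI, hI', ih _ _ _ hnext]

theorem rmv_nil (rest : List Char) : ∀ (i : Nat), rmv rest i [] = rest := by
  induction rest with
  | nil => intro i; rfl
  | cons c rest ih => intro i; simp [rmv, ih]

theorem rmv_low (rest : List Char) (i : Nat) (I : List Nat) (h : ∀ x ∈ I, x < i) :
    rmv rest i I = rest := by
  rw [rmv_congr rest i I []]
  · exact rmv_nil rest i
  · intro x hx
    constructor
    · intro hmem; exact absurd (h x hmem) (by omega)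
    · intro hmem; simp at hmem

theorem rmv_length_le (rest : List Char) : ∀ (i : Nat) (I : List Nat),
    (rmv rest i I).length ≤ rest.length := by
  induction rest with
  | nil => intro i I; simp [rmv]
  | cons c rest ih =>
    intro i I
    by_cases hI : i ∈ I
    · simp only [rmv, hI, if_true]
      exact le_trans (ih _ _) (by simp)
    · simp only [rmv, hI, if_false, List.length_cons]
      exact Nat.succ_le_succ (ih _ _)

theorem rmv_length_lt (rest : List Char) : ∀ (i : Nat) (I : List Nat) (x : Nat),
    x ∈ I → i ≤ x → x < i + rest.length → (rmv rest i I).length < rest.length := by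
  induction rest with
  | nil => intro i I x _ _ h; simp at h; omega
  | cons c rest ih =>
    intro i I x hxI hix hxb
    by_cases hI : i ∈ I
    · simp only [rmv, hI, if_true, List.length_cons]
      exact Nat.lt_succ_of_le (rmv_length_le rest (i+1) I)
    · have hxi : x ≠ i := fun h => hI (h ▸ hxI)
      simp only [rmv, hI, if_false, List.length_cons]
      have hb2 : x < (i+1) + rest.length := by
        simp only [List.length_cons] at hxb; omega
      exact Nat.succ_lt_succ (ih (i+1) I x hxI (by omega) hb2)

-- sh arithmetic
theorem countP_lt_le (I : List Nat) (h : I.Nodup) (i : Nat) : I.countP (fun x => x < i) ≤ i := by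
  have h1 : (I.filter (fun x => x < i)).Nodup := h.filter _
  have h2 : (I.filter (fun x => x < i)) ⊆ List.range i := by
    intro x hx
    simp only [List.mem_filter, decide_eq_true_eq] at hx
    exact List.mem_range.mpr hx.2
  have h3 := (h1.subperm h2).length_le
  rw [← List.countP_eq_length_filter] at h3
  simpa using h3

theorem countP_succ (I : List Nat) (i : Nat) :
    I.countP (fun x => x < i + 1) = I.countP (fun x => x < i) + I.count i := by
  induction I with
  | nil => simp
  | cons a I ih =>
    simp only [List.countP_cons, List.count_cons, ih, decide_eq_true_eq, beq_iff_eq]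
    split_ifs <;> omega

theorem sh_succ_mem (I : List Nat) (h : I.Nodup) (i : Nat) (hi : i ∈ I) :
    sh I (i + 1) = sh I i := by
  unfold sh
  rw [countP_succ]
  rw [List.count_eq_one_of_mem h hi]
  omega

theorem sh_succ_not_mem (I : List Nat) (h : I.Nodup) (i : Nat) (hi : i ∉ I) :
    sh I (i + 1) = sh I i + 1 := by
  unfold sh
  rw [countP_succ]
  rw [List.count_eq_zero_of_not_mem hi]
  have := countP_lt_le I h i
  omega

theorem countP_le_split (I : List Nat) (x y : Nat) :
    I.countP (fun t => t < y) ≤ I.countP (fun t => t < x) + I.countP (fun t => decide (x ≤ t) && decide (t < y)) := by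
  induction I with
  | nil => simp
  | cons a I ih =>
    simp only [List.countP_cons, decide_eq_true_eq, Bool.and_eq_true]
    split_ifs <;> omega

theorem sh_mono (I : List Nat) (h : I.Nodup) (x y : Nat) (hxy : x < y) (hx : x ∉ I) :
    sh I x < sh I y := by
  unfold sh
  have hsplit : I.countP (fun t => t < y) ≤ I.countP (fun t => t < x) + (y - x - 1) := by
    have hfn : (I.filter (fun t => decide (x ≤ t) && decide (t < y))).Nodup := h.filter _
    have hfs : (I.filter (fun t => decide (x ≤ t) && decide (t < y))) ⊆ List.range' (x+1) (y - x - 1) := by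
      intro t ht
      simp only [List.mem_filter, Bool.and_eq_true, decide_eq_true_eq] at ht
      have htx : t ≠ x := fun hh => hx (hh ▸ ht.1)
      refine List.mem_range'.mpr ?_
      refine ⟨t - x - 1, by omega, by omega⟩
    have hlen := (hfn.subperm hfs).length_le
    rw [List.length_range'] at hlen
    have hcc := countP_le_split I x y
    rw [← List.countP_eq_length_filter] at hlen
    omega
  have hle := countP_lt_le I h x
  omega

-- membership facts about the pairs a marked scan emits
theorem mscan_mem (rest : List Char) : ∀ (i : Nat) (st : List Nat) (acc : List (Nat × Nat))
    (I : List Nat) (stF : List Nat) (P : List (Nat × Nat)),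
    mscan rest i st acc I = some (stF, P) → (∀ x ∈ st, x < i) →
    ∀ pr ∈ P, pr ∈ acc ∨
      ((pr.1 ∈ st ∨ (i ≤ pr.1 ∧ pr.1 ∉ I)) ∧ i ≤ pr.2 ∧ pr.2 ∉ I ∧ pr.1 < pr.2 ∧
        pr.2 < i + rest.length) := by
  induction rest with
  | nil =>
    intro i st acc I stF P h _ pr hpr
    simp [mscan] at h
    exact Or.inl (h.2 ▸ hpr)
  | cons c rest ih =>
    intro i st acc I stF P h hst pr hpr
    simp only [mscan] at h
    by_cases hI : i ∈ I
    · rw [if_pos hI] at h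
      rcases ih (i+1) st acc I stF P h (fun x hx => by have := hst x hx; omega) pr hpr with h1 | h2
      · exact Or.inl h1
      · refine Or.inr ⟨?_, by omega, h2.2.2.1, h2.2.2.2.1, by have := h2.2.2.2.2; simp only [List.length_cons]; omega⟩
        rcases h2.1 with ha | hb
        · exact Or.inl ha
        · exact Or.inr ⟨by omega, hb.2⟩
    · rw [if_neg hI] at h
      by_cases hc : c = '('
      · rw [if_pos hc] at h
        rcases ih (i+1) (i :: st) acc I stF P h
          (by intro x hx; rcases List.mem_cons.mp hx with h1 | h1; omega; have := hst x h1; omega)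
          pr hpr with h1 | h2
        · exact Or.inl h1
        · refine Or.inr ⟨?_, by omega, h2.2.2.1, h2.2.2.2.1, by have := h2.2.2.2.2; simp only [List.length_cons]; omega⟩
          rcases h2.1 with ha | hb
          · rcases List.mem_cons.mp ha with h1 | h1
            · exact Or.inr ⟨by omega, h1 ▸ hI⟩
            · exact Or.inl h1
          · exact Or.inr ⟨by omega, hb.2⟩
      · by_cases hc2 : c = ')'
        · rw [if_neg hc, if_pos hc2] at h
          match st, hst with
          | [], _ => simp at h
          | l :: st', hst =>
            simp only at h
            rcases ih (i+1) st' (acc ++ [(l, i)]) I stF P h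
              (by intro x hx; have := hst x (List.mem_cons_of_mem l hx); omega)
              pr hpr with h1 | h2
            · rcases List.mem_append.mp h1 with ha | hb
              · exact Or.inl ha
              · simp at hb
                subst hb
                refine Or.inr ⟨Or.inl (List.mem_cons_self), by omega, hI, ?_, by simp⟩
                exact hst l List.mem_cons_self
            · refine Or.inr ⟨?_, by omega, h2.2.2.1, h2.2.2.2.1, by have := h2.2.2.2.2; simp only [List.length_cons]; omega⟩
              rcases h2.1 with ha | hb
              · exact Or.inl (List.mem_cons_of_mem l ha)
              · exact Or.inr ⟨by omega, hb.2⟩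
        · rw [if_neg hc, if_neg hc2] at h
          rcases ih (i+1) st acc I stF P h (fun x hx => by have := hst x hx; omega) pr hpr with h1 | h2
          · exact Or.inl h1
          · refine Or.inr ⟨?_, by omega, h2.2.2.1, h2.2.2.2.1, by have := h2.2.2.2.2; simp only [List.length_cons]; omega⟩
            rcases h2.1 with ha | hb
            · exact Or.inl ha
            · exact Or.inr ⟨by omega, hb.2⟩

-- well-formedness: all indices mentioned in the emitted pairs are distinct and bounded
theorem mscan_wf (rest : List Char) : ∀ (i : Nat) (st : List Nat) (acc : List (Nat × Nat))
    (I : List Nat) (stF : List Nat) (P : List (Nat × Nat)),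
    mscan rest i st acc I = some (stF, P) →
    (∀ x ∈ st, x < i) → st.Nodup →
    (∀ x ∈ marks acc, x < i) → (marks acc).Nodup →
    (∀ x ∈ st, x ∉ marks acc) →
    (marks P).Nodup ∧ (∀ x ∈ marks P, x < i + rest.length) := by
  induction rest with
  | nil =>
    intro i st acc I stF P h hst _ hacc haccn _
    simp [mscan] at h
    exact ⟨h.2 ▸ haccn, by intro x hx; have := hacc x (h.2 ▸ hx); omega⟩
  | cons c rest ih =>
    intro i st acc I stF P h hst hstn hacc haccn hdisj
    simp only [mscan] at h
    have hnext : ∀ (st' : List Nat), (∀ x ∈ st', x < i) → (∀ x ∈ st', x < i + 1) :=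
      fun st' hh x hx => by have := hh x hx; omega
    have haccnext : (∀ x ∈ marks acc, x < i + 1) := fun x hx => by have := hacc x hx; omega
    have hlen : i + (c :: rest).length = (i + 1) + rest.length := by simp; omega
    by_cases hI : i ∈ I
    · rw [if_pos hI] at h
      rcases ih (i+1) st acc I stF P h (hnext st hst) hstn haccnext haccn hdisj with ⟨h1, h2⟩
      exact ⟨h1, by rw [hlen]; exact h2⟩
    · rw [if_neg hI] at h
      by_cases hc : c = '('
      · rw [if_pos hc] at h
        have hstn' : (i :: st).Nodup := by
          refine List.nodup_cons.mpr ⟨fun hmem => ?_, hstn⟩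
          have := hst i hmem; omega
        have hdisj' : ∀ x ∈ i :: st, x ∉ marks acc := by
          intro x hx
          rcases List.mem_cons.mp hx with h1 | h1
          · subst h1; intro hmem; have := hacc x hmem; omega
          · exact hdisj x h1
        have hst' : ∀ x ∈ i :: st, x < i + 1 := by
          intro x hx
          rcases List.mem_cons.mp hx with h1 | h1
          · omega
          · have := hst x h1; omega
        rcases ih (i+1) (i :: st) acc I stF P h hst' hstn' haccnext haccn hdisj' with ⟨h1, h2⟩
        exact ⟨h1, by rw [hlen]; exact h2⟩
      · by_cases hc2 : c = ')'
        · rw [if_neg hc, if_pos hc2] at h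
          match st, hst, hstn, hdisj with
          | [], _, _, _ => simp at h
          | l :: st', hst, hstn, hdisj =>
            simp only at h
            have hl : l < i := hst l List.mem_cons_self
            have hmacc' : marks (acc ++ [(l, i)]) = marks acc ++ [l, i] := by
              rw [marks_append]; rfl
            have haccn' : (marks (acc ++ [(l, i)])).Nodup := by
              rw [hmacc']
              refine List.Nodup.append haccn (by simp; omega) ?_
              intro x hx hy
              simp at hy
              rcases hy with h1 | h1
              · exact (hdisj l List.mem_cons_self) (h1 ▸ hx)
              · subst h1; have := hacc x hx; omega
            have hacc' : ∀ x ∈ marks (acc ++ [(l, i)]), x < i + 1 := by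
              rw [hmacc']
              intro x hx
              rcases List.mem_append.mp hx with h1 | h1
              · have := hacc x h1; omega
              · simp at h1; omega
            have hdisj' : ∀ x ∈ st', x ∉ marks (acc ++ [(l, i)]) := by
              rw [hmacc']
              intro x hx hmem
              rcases List.mem_append.mp hmem with h1 | h1
              · exact hdisj x (List.mem_cons_of_mem l hx) h1
              · simp at h1
                rcases h1 with h1 | h1
                · exact (List.nodup_cons.mp hstn).1 (h1 ▸ hx)
                · have := hst x (List.mem_cons_of_mem l hx); omega
            rcases ih (i+1) st' (acc ++ [(l, i)]) I stF P h
              (fun x hx => by have := hst x (List.mem_cons_of_mem l hx); omega)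
              (List.nodup_cons.mp hstn).2 hacc' haccn' hdisj' with ⟨h1, h2⟩
            exact ⟨h1, by rw [hlen]; exact h2⟩
        · rw [if_neg hc, if_neg hc2] at h
          rcases ih (i+1) st acc I stF P h (hnext st hst) hstn haccnext haccn hdisj with ⟨h1, h2⟩
          exact ⟨h1, by rw [hlen]; exact h2⟩

-- stale stack entries below the current scan's frame are never touched
theorem mscan_stale (rest : List Char) : ∀ (i : Nat) (st st0 : List Nat)
    (acc : List (Nat × Nat)) (I : List Nat) (out : List Nat × List (Nat × Nat)),
    mscan rest i st acc I = some out →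
    mscan rest i (st ++ st0) acc I = some (out.1 ++ st0, out.2) := by
  induction rest with
  | nil =>
    intro i st st0 acc I out h
    simp only [mscan] at h
    cases h
    simp [mscan]
  | cons c rest ih =>
    intro i st st0 acc I out h
    simp only [mscan] at h ⊢
    by_cases hI : i ∈ I
    · rw [if_pos hI] at h ⊢; exact ih _ _ _ _ _ _ h
    · rw [if_neg hI] at h ⊢
      by_cases hc : c = '('
      · rw [if_pos hc] at h ⊢
        exact ih (i+1) (i :: st) st0 acc I out h
      · by_cases hc2 : c = ')'
        · rw [if_neg hc, if_pos hc2] at h ⊢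
          match st with
          | [] => simp at h
          | l :: st' =>
            simp only [List.cons_append]
            exact ih (i+1) st' st0 (acc ++ [(l, i)]) I out h
        · rw [if_neg hc, if_neg hc2] at h ⊢; exact ih _ _ _ _ _ _ h

-- phase 2 of marking a matched pair (l, r): l is already on the stack of the
-- unmarked run and absent from the marked run; the runs stay in lock-step and
-- the marked run merely misses the single emission (l, r).
theorem mscan_sim (rest : List Char) : ∀ (i : Nat) (u b : List Nat) (acc : List (Nat × Nat))
    (I : List Nat) (l r : Nat) (stF : List Nat) (P : List (Nat × Nat)),
    mscan rest i (u ++ l :: b) acc I = some (stF, P) →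
    (l, r) ∈ P → (l, r) ∉ acc →
    (∀ x ∈ u ++ l :: b, x < i) → (u ++ l :: b).Nodup →
    mscan rest i (u ++ b) acc (r :: I) = some (stF, P.erase (l, r)) := by
  induction rest with
  | nil =>
    intro i u b acc I l r stF P h hP hacc _ _
    simp [mscan] at h
    exact absurd (h.2 ▸ hP) hacc
  | cons c rest ih =>
    intro i u b acc I l r stF P h hP hacc hbound hnodup
    have hli : l < i := hbound l (by simp)
    simp only [mscan] at h ⊢
    by_cases hI : i ∈ I
    · have hIr : i ∈ r :: I := List.mem_cons_of_mem r hI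
      rw [if_pos hI] at h
      rw [if_pos hIr]
      exact ih (i+1) u b acc I l r stF P h hP hacc (fun x hx => by have := hbound x hx; omega) hnodup
    · rw [if_neg hI] at h
      by_cases hc : c = '('
      · rw [if_pos hc] at h
        have hri : i + 1 ≤ r := by
          rcases mscan_mem rest (i+1) (i :: (u ++ l :: b)) acc I stF P h
            (by intro x hx; rcases List.mem_cons.mp hx with h1 | h1
                · omega
                · have := hbound x h1; omega)
            (l, r) hP with h1 | h2
          · exact absurd h1 hacc
          · exact h2.2.1
        have hIr : i ∉ r :: I := by
          intro hmem
          rcases List.mem_cons.mp hmem with h1 | h1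
          · omega
          · exact hI h1
        rw [if_neg hIr, if_pos hc]
        have := ih (i+1) (i :: u) b acc I l r stF P (by simpa using h) hP hacc
          (by intro x hx
              rcases List.mem_cons.mp hx with h1 | h1
              · omega
              · have := hbound x (by simpa using h1); omega)
          (by refine List.nodup_cons.mpr ⟨fun hmem => ?_, hnodup⟩
              have := hbound i (by simpa using hmem); omega)
        simpa using this
      · by_cases hc2 : c = ')'
        · rw [if_neg hc, if_pos hc2] at h
          match u with
          | v :: u' =>
            simp only [List.cons_append] at h
            have hbt : ∀ x ∈ u' ++ l :: b, x < i := fun x hx => hbound x (List.mem_cons_of_mem v hx)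
            have hnt : (u' ++ l :: b).Nodup := (List.nodup_cons.mp hnodup).2
            have hvl : v ≠ l := by
              have := (List.nodup_cons.mp hnodup).1
              intro hh; exact this (hh ▸ (by simp : l ∈ u' ++ l :: b))
            have hri : i + 1 ≤ r := by
              rcases mscan_mem rest (i+1) (u' ++ l :: b) (acc ++ [(v, i)]) I stF P h
                (fun x hx => by have := hbt x hx; omega) (l, r) hP with h1 | h2
              · rcases List.mem_append.mp h1 with ha | hb
                · exact absurd ha hacc
                · simp at hb; exact absurd hb.1.symm hvl
              · exact h2.2.1
            have hIr : i ∉ r :: I := by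
              intro hmem
              rcases List.mem_cons.mp hmem with h1 | h1
              · omega
              · exact hI h1
            rw [if_neg hIr, if_neg hc, if_pos hc2]
            simp only [List.cons_append]
            refine ih (i+1) u' b (acc ++ [(v, i)]) I l r stF P h hP ?_
              (fun x hx => by have := hbt x hx; omega) hnt
            intro hmem
            rcases List.mem_append.mp hmem with ha | hb
            · exact hacc ha
            · simp at hb; exact hvl hb.1.symm
          | [] =>
            simp only [List.nil_append] at h ⊢
            have hbb : ∀ x ∈ b, x < i + 1 := by
              intro x hx; have := hbound x (by simp [hx]); omega
            have hlb : l ∉ b := by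
              have := List.nodup_cons.mp hnodup; exact this.1
            have hri : r = i := by
              rcases mscan_mem rest (i+1) b (acc ++ [(l, i)]) I stF P h hbb (l, r) hP with h1 | h2
              · rcases List.mem_append.mp h1 with ha | hb
                · exact absurd ha hacc
                · simp at hb; omega
              · rcases h2.1 with ha | hb
                · exact absurd ha hlb
                · omega
            have hIr : i ∈ r :: I := by simp [hri]
            rw [if_pos hIr]
            -- peel the freshly emitted pair off the accumulator
            rw [mscan_acc rest (i+1) b (acc ++ [(l, i)]) I] at h
            cases hq : mscan rest (i+1) b [] I with
            | none => rw [hq] at h; simp at h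
            | some out =>
              rw [hq] at h
              simp only [Option.map_some] at h
              obtain ⟨h1, h2⟩ := Prod.mk.injEq .. ▸ (Option.some.injEq .. ▸ h)
              rw [mscan_congr rest (i+1) b acc (r :: I) I
                (by intro x hx; simp; omega)]
              rw [mscan_acc rest (i+1) b acc I, hq]
              simp only [Option.map_some, Option.some.injEq, Prod.mk.injEq]
              refine ⟨h1, ?_⟩
              rw [← h2, hri]
              rw [show acc ++ [(l, i)] ++ out.2 = acc ++ ((l, i) :: out.2) by simp]
              rw [List.erase_append_right _ (by rw [← hri]; exact hacc)]
              simp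
        · rw [if_neg hc, if_neg hc2] at h
          have hri : i + 1 ≤ r := by
            rcases mscan_mem rest (i+1) (u ++ l :: b) acc I stF P h
              (fun x hx => by have := hbound x hx; omega) (l, r) hP with h1 | h2
            · exact absurd h1 hacc
            · exact h2.2.1
          have hIr : i ∉ r :: I := by
            intro hmem
            rcases List.mem_cons.mp hmem with h1 | h1
            · omega
            · exact hI h1
          rw [if_neg hIr, if_neg hc, if_neg hc2]
          exact ih (i+1) u b acc I l r stF P h hP hacc (fun x hx => by have := hbound x hx; omega) hnodup

-- phase 1: before l is reached the two runs are identical; at l the marked run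
-- skips the push and phase 2 (mscan_sim) takes over.
theorem mscan_unmark (rest : List Char) : ∀ (i : Nat) (st : List Nat) (acc : List (Nat × Nat))
    (I : List Nat) (l r : Nat) (stF : List Nat) (P : List (Nat × Nat)),
    mscan rest i st acc I = some (stF, P) →
    (l, r) ∈ P → (l, r) ∉ acc →
    (∀ x ∈ st, x < i) → st.Nodup → l ∉ st →
    mscan rest i st acc (l :: r :: I) = some (stF, P.erase (l, r)) := by
  induction rest with
  | nil =>
    intro i st acc I l r stF P h hP hacc _ _ _
    simp [mscan] at h
    exact absurd (h.2 ▸ hP) hacc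
  | cons c rest ih =>
    intro i st acc I l r stF P h hP hacc hbound hnodup hlst
    -- facts about l and r from the whole run
    have hmem0 := mscan_mem (c :: rest) i st acc I stF P h hbound (l, r) hP
    have hfacts : i ≤ l ∧ l ∉ I ∧ i ≤ r ∧ r ∉ I ∧ l < r := by
      rcases hmem0 with h1 | h2
      · exact absurd h1 hacc
      · rcases h2.1 with ha | hb
        · exact absurd ha hlst
        · exact ⟨hb.1, hb.2, h2.2.1, h2.2.2.1, h2.2.2.2.1⟩
    obtain ⟨hil, hlI, hir, hrI, hlr⟩ := hfacts
    simp only [mscan] at h ⊢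
    by_cases hI : i ∈ I
    · have hil2 : i ≠ l := fun hh => hlI (hh ▸ hI)
      have hir2 : i ≠ r := fun hh => hrI (hh ▸ hI)
      have hIm : i ∈ l :: r :: I := by simp [hI]
      rw [if_pos hI] at h
      rw [if_pos hIm]
      exact ih (i+1) st acc I l r stF P h hP hacc (fun x hx => by have := hbound x hx; omega)
        hnodup hlst
    · rw [if_neg hI] at h
      by_cases hc : c = '('
      · rw [if_pos hc] at h
        by_cases hil : i = l
        · -- the marked run skips the push of l; phase 2 starts
          subst hil
          have hIm : i ∈ i :: r :: I := by simp
          rw [if_pos hIm]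
          have hsim := mscan_sim rest (i+1) [] st acc I i r stF P (by simpa using h) hP hacc
            (by intro x hx
                rcases List.mem_cons.mp (by simpa using hx) with h1 | h1
                · omega
                · have := hbound x h1; omega)
            (by simpa using List.nodup_cons.mpr ⟨hlst, hnodup⟩)
          simp only [List.nil_append] at hsim
          rw [mscan_congr rest (i+1) st acc (i :: r :: I) (r :: I)
            (by intro x hx; simp; omega)]
          exact hsim
        · -- an unrelated push: both runs push i
          have hri : i ≠ r := by
            rcases mscan_mem rest (i+1) (i :: st) acc I stF P h
              (by intro x hx; rcases List.mem_cons.mp hx with h1 | h1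
                  · omega
                  · have := hbound x h1; omega) (l, r) hP with h1 | h2
            · exact absurd h1 hacc
            · omega
          have hIm : i ∉ l :: r :: I := by simp [hI, hri, hil]
          rw [if_neg hIm, if_pos hc]
          exact ih (i+1) (i :: st) acc I l r stF P h hP hacc
            (by intro x hx; rcases List.mem_cons.mp hx with h1 | h1
                · omega
                · have := hbound x h1; omega)
            (List.nodup_cons.mpr ⟨fun hmem => by have := hbound i hmem; omega, hnodup⟩)
            (by intro hmem; rcases List.mem_cons.mp hmem with h1 | h1
                · exact hil h1.symm
                · exact hlst h1)
      · by_cases hc2 : c = ')'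
        · rw [if_neg hc, if_pos hc2] at h
          match st, hbound, hnodup, hlst with
          | [], _, _, _ => simp at h
          | v :: st', hbound, hnodup, hlst =>
            simp only at h
            have hvl : v ≠ l := fun hh => hlst (hh ▸ List.mem_cons_self)
            have hbt : ∀ x ∈ st', x < i + 1 :=
              fun x hx => by have := hbound x (List.mem_cons_of_mem v hx); omega
            have hmem1 := mscan_mem rest (i+1) st' (acc ++ [(v, i)]) I stF P h hbt (l, r) hP
            have hacc1 : (l, r) ∉ acc ++ [(v, i)] := by
              intro hmem
              rcases List.mem_append.mp hmem with ha | hb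
              · exact hacc ha
              · simp at hb; exact hvl hb.1.symm
            have hlr1 : i + 1 ≤ l := by
              rcases hmem1 with h1 | h2
              · exact absurd h1 hacc1
              · rcases h2.1 with ha | hb
                · exact absurd ha (fun hh => hlst (List.mem_cons_of_mem v ha))
                · exact hb.1
            have hIm : i ∉ l :: r :: I := by simp [hI]; omega
            rw [if_neg hIm, if_neg hc, if_pos hc2]
            simp only
            exact ih (i+1) st' (acc ++ [(v, i)]) I l r stF P h hP hacc1 hbt
              (List.nodup_cons.mp hnodup).2
              (fun hmem => hlst (List.mem_cons_of_mem v hmem))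
        · rw [if_neg hc, if_neg hc2] at h
          have hlr1 : i + 1 ≤ l := by
            rcases mscan_mem rest (i+1) st acc I stF P h
              (fun x hx => by have := hbound x hx; omega) (l, r) hP with h1 | h2
            · exact absurd h1 hacc
            · rcases h2.1 with ha | hb
              · exact absurd ha hlst
              · exact hb.1
          have hIm : i ∉ l :: r :: I := by simp [hI]; omega
          rw [if_neg hIm, if_neg hc, if_neg hc2]
          exact ih (i+1) st acc I l r stF P h hP hacc
            (fun x hx => by have := hbound x hx; omega) hnodup hlst

-- top level: marking one matched pair of a marked scan removes exactly that pair
theorem mscan_mark_pair (cs : List Char) (I : List Nat) (l r : Nat)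
    (stF : List Nat) (P : List (Nat × Nat))
    (h : mscan cs 0 [] [] I = some (stF, P)) (hP : (l, r) ∈ P) :
    mscan cs 0 [] [] (l :: r :: I) = some (stF, P.erase (l, r)) := by
  exact mscan_unmark cs 0 [] [] I l r stF P h hP (by simp) (by simp) (by simp) (by simp)

theorem mem_marks {S : List (Nat × Nat)} {x : Nat} :
    x ∈ marks S ↔ ∃ p ∈ S, x = p.1 ∨ x = p.2 := by
  simp only [marks, List.mem_flatMap]
  constructor
  · rintro ⟨p, hp, hx⟩
    simp at hx
    exact ⟨p, hp, hx⟩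
  · rintro ⟨p, hp, hx⟩
    exact ⟨p, hp, by simp [hx]⟩

theorem nodup_of_marks_nodup (S : List (Nat × Nat)) (h : (marks S).Nodup) : S.Nodup := by
  induction S with
  | nil => simp
  | cons p S ih =>
    have hm : marks (p :: S) = p.1 :: p.2 :: marks S := rfl
    rw [hm] at h
    have h1 := List.nodup_cons.mp h
    have h2 := List.nodup_cons.mp h1.2
    refine List.nodup_cons.mpr ⟨fun hmem => ?_, ih h2.2⟩
    exact (by simp at h1; exact h1.1.2 : p.1 ∉ marks S) (mem_marks.mpr ⟨p, hmem, Or.inl rfl⟩)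

theorem filter_erase (P0 : List (Nat × Nat)) : ∀ (S' : List (Nat × Nat)) (p : Nat × Nat),
    P0.Nodup → p ∈ P0 → p ∉ S' →
    (P0.filter (fun q => q ∉ S')).erase p = P0.filter (fun q => q ∉ (p :: S')) := by
  induction P0 with
  | nil => intro S' p _ hp _; simp at hp
  | cons q P0 ih =>
    intro S' p hn hp hps
    have hn2 := List.nodup_cons.mp hn
    by_cases hqp : q = p
    · subst hqp
      rw [List.filter_cons_of_pos (by simpa using hps)]
      rw [List.erase_cons_head]
      rw [List.filter_cons_of_neg (by simp)]
      refine List.filter_congr ?_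
      intro x hx
      have hxq : x ≠ q := fun hh => hn2.1 (hh ▸ hx)
      simp [hxq]
    · have hpP : p ∈ P0 := by
        rcases List.mem_cons.mp hp with h1 | h1
        · exact absurd h1.symm hqp
        · exact h1
      by_cases hqS : q ∈ S'
      · rw [List.filter_cons_of_neg (by simpa using hqS),
          List.filter_cons_of_neg (by simp [hqS])]
        exact ih S' p hn2.2 hpP hps
      · rw [List.filter_cons_of_pos (by simpa using hqS),
          List.filter_cons_of_pos (by simp [hqS, hqp])]
        rw [List.erase_cons_tail (by simp [hqp])]
        rw [ih S' p hn2.2 hpP hps]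

-- iterating mscan_mark_pair over a sublist S of the pair list
theorem mscan_marks_sublist (cs : List Char) (stF : List Nat) (P0 : List (Nat × Nat))
    (h0 : mscan cs 0 [] [] [] = some (stF, P0)) (hmn : (marks P0).Nodup) :
    ∀ S, S.Sublist P0 → mscan cs 0 [] [] (marks S) = some (stF, P0.filter (fun p => p ∉ S)) := by
  have hP0n : P0.Nodup := nodup_of_marks_nodup P0 hmn
  intro S hS
  induction S with
  | nil =>
    have : P0.filter (fun p => p ∉ ([] : List (Nat × Nat))) = P0 := by
      refine List.filter_eq_self.mpr ?_
      intro a _; simp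
    rw [this]
    exact h0
  | cons p S' ih =>
    have hS' : S'.Sublist P0 := List.sublist_of_cons_sublist hS
    have hSn : (p :: S').Nodup := List.Nodup.sublist hS hP0n
    have hpS' : p ∉ S' := (List.nodup_cons.mp hSn).1
    have hpP0 : p ∈ P0 := hS.subset List.mem_cons_self
    have hmarks : marks (p :: S') = p.1 :: p.2 :: marks S' := rfl
    have hmem : p ∈ P0.filter (fun q => q ∉ S') := by
      rw [List.mem_filter]
      exact ⟨hpP0, by simpa using hpS'⟩
    have := mscan_mark_pair cs (marks S') p.1 p.2 stF _ (ih hS') hmem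
    rw [hmarks]
    rw [this]
    rw [filter_erase P0 S' p hP0n hpP0 hpS']

-- a pair p ∈ P0 \ S can be inserted into the sublist S giving again a sublist, up to permutation
theorem sublist_insert (P0 : List (Nat × Nat)) : ∀ (S : List (Nat × Nat)) (p : Nat × Nat),
    p ∈ P0 → S.Sublist P0 → p ∉ S →
    ∃ S2 : List (Nat × Nat), S2.Sublist P0 ∧ S2.Perm (p :: S) := by
  induction P0 with
  | nil => intro S p hp _ _; simp at hp
  | cons q P0 ih =>
    intro S p hp hS hpS
    rcases List.sublist_cons_iff.mp hS with hS1 | ⟨S', rfl, hS'⟩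
    · rcases List.mem_cons.mp hp with hpq | hpP0
      · subst hpq
        exact ⟨p :: S, (hS1.cons_cons p : (p :: S).Sublist (p :: P0)), List.Perm.refl _⟩
      · rcases ih S p hpP0 hS1 hpS with ⟨S2, hsub, hperm⟩
        exact ⟨S2, List.sublist_cons_of_sublist q hsub, hperm⟩
    · have hpq : p ≠ q := fun hh => hpS (hh ▸ List.mem_cons_self)
      have hpP0 : p ∈ P0 := by
        rcases List.mem_cons.mp hp with h1 | h1
        · exact absurd h1 hpq
        · exact h1
      rcases ih S' p hpP0 hS' (fun hmem => hpS (List.mem_cons_of_mem q hmem)) with ⟨S2, hsub, hperm⟩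
      exact ⟨q :: S2, hsub.cons_cons q, (hperm.cons q).trans (List.Perm.swap p q S')⟩

-- scanning the reduced string is the marked scan with all indices shifted by sh I
theorem mscan_shift (rest : List Char) : ∀ (i : Nat) (st : List Nat) (acc : List (Nat × Nat))
    (I : List Nat) (stF : List Nat) (P : List (Nat × Nat)), I.Nodup →
    mscan rest i st acc I = some (stF, P) →
    mscan (rmv rest i I) (sh I i) (st.map (sh I))
        (acc.map (fun p => (sh I p.1, sh I p.2))) [] =
      some (stF.map (sh I), P.map (fun p => (sh I p.1, sh I p.2))) := by
  induction rest with
  | nil =>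
    intro i st acc I stF P _ h
    simp only [mscan] at h
    cases h
    simp [rmv, mscan]
  | cons c rest ih =>
    intro i st acc I stF P hIn h
    simp only [mscan] at h
    by_cases hI : i ∈ I
    · rw [if_pos hI] at h
      have := ih (i+1) st acc I stF P hIn h
      rw [sh_succ_mem I hIn i hI] at this
      simpa [rmv, hI] using this
    · rw [if_neg hI] at h
      have hsh : sh I (i+1) = sh I i + 1 := sh_succ_not_mem I hIn i hI
      by_cases hc : c = '('
      · rw [if_pos hc] at h
        have := ih (i+1) (i :: st) acc I stF P hIn h
        rw [hsh] at this
        simp only [rmv, if_neg hI, mscan, if_pos hc, List.not_mem_nil, if_neg (fun h => h : ¬False)]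
        simpa using this
      · by_cases hc2 : c = ')'
        · rw [if_neg hc, if_pos hc2] at h
          match st with
          | [] => simp at h
          | l :: st' =>
            simp only at h
            have := ih (i+1) st' (acc ++ [(l, i)]) I stF P hIn h
            rw [hsh] at this
            simp only [rmv, if_neg hI, mscan, if_neg hc, if_pos hc2, List.not_mem_nil,
              if_neg (fun h => h : ¬False), List.map_cons]
            simpa using this
        · rw [if_neg hc, if_neg hc2] at h
          have := ih (i+1) st acc I stF P hIn h
          rw [hsh] at this
          simp only [rmv, if_neg hI, mscan, if_neg hc, if_neg hc2, List.not_mem_nil,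
            if_neg (fun h => h : ¬False)]
          simpa using this

-- removing J from the already-reduced string removes J ++ I from the original
theorem rmv_rmv (rest : List Char) : ∀ (i : Nat) (I J : List Nat), I.Nodup →
    (∀ x ∈ J, x ∉ I) →
    rmv (rmv rest i I) (sh I i) (J.map (sh I)) = rmv rest i (J ++ I) := by
  induction rest with
  | nil => intro i I J _ _; simp [rmv]
  | cons c rest ih =>
    intro i I J hIn hJI
    by_cases hI : i ∈ I
    · have hsh := sh_succ_mem I hIn i hI
      have hJII : i ∈ J ++ I := List.mem_append.mpr (Or.inr hI)
      simp only [rmv, if_pos hI, if_pos hJII]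
      rw [← hsh]
      exact ih (i+1) I J hIn hJI
    · have hsh := sh_succ_not_mem I hIn i hI
      by_cases hJ : i ∈ J
      · have hJII : i ∈ J ++ I := List.mem_append.mpr (Or.inl hJ)
        have hmem : sh I i ∈ J.map (sh I) := List.mem_map.mpr ⟨i, hJ, rfl⟩
        simp only [rmv, if_neg hI, if_pos hJII, if_pos hmem]
        rw [← hsh]
        exact ih (i+1) I J hIn hJI
      · have hJII : i ∉ J ++ I := by
          intro hmem
          rcases List.mem_append.mp hmem with h1 | h1
          · exact hJ h1
          · exact hI h1
        have hmem : sh I i ∉ J.map (sh I) := by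
          intro hmem
          rcases List.mem_map.mp hmem with ⟨j, hjJ, hj⟩
          have hji : j ≠ i := fun hh => hJ (hh ▸ hjJ)
          have hjI : j ∉ I := hJI j hjJ
          rcases Nat.lt_or_ge j i with h1 | h1
          · have := sh_mono I hIn j i h1 hjI; omega
          · have := sh_mono I hIn i j (by omega) hI; omega
        simp only [rmv, if_neg hI, if_neg hJII, if_neg hmem]
        rw [← hsh]
        rw [ih (i+1) I J hIn hJI]

theorem rmv_single (rest : List Char) : ∀ (i a : Nat), i ≤ a → a < i + rest.length →
    rmv rest i [a] = rest.take (a - i) ++ rest.drop (a - i + 1) := by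
  induction rest with
  | nil => intro i a _ h; simp at h; omega
  | cons c rest ih =>
    intro i a hia hab
    by_cases hi : i = a
    · subst hi
      have h1 : i ∈ [i] := by simp
      simp only [rmv, if_pos h1, Nat.sub_self, List.take_zero, List.nil_append]
      rw [rmv_low rest (i+1) [i] (by simp)]
      simp
    · have h1 : i ∉ [a] := by simp; omega
      simp only [rmv, if_neg h1]
      rw [ih (i+1) a (by omega) (by simp at hab ⊢; omega)]
      have h2 : a - i = (a - (i+1)) + 1 := by omega
      rw [h2, List.take_succ_cons, List.drop_succ_cons]
      simp

theorem rmv_pair (rest : List Char) : ∀ (i a b : Nat), i ≤ a → a < b → b < i + rest.length →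
    rmv rest i [a, b] =
      rest.take (a - i) ++ ((rest.drop (a - i + 1)).take (b - a - 1)) ++ rest.drop (b - i + 1) := by
  induction rest with
  | nil => intro i a b _ _ h; simp at h; omega
  | cons c rest ih =>
    intro i a b hia hab hbb
    by_cases hi : i = a
    · subst hi
      have h1 : i ∈ [i, b] := by simp
      simp only [rmv, if_pos h1, Nat.sub_self, List.take_zero, List.nil_append]
      rw [rmv_congr rest (i+1) [i, b] [b] (by intro x hx; simp; omega)]
      rw [rmv_single rest (i+1) b (by omega) (by simp at hbb ⊢; omega)]
      have h4 : b - i + 1 = (b - (i+1) + 1) + 1 := by omega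
      have h5 : b - i - 1 = b - (i+1) := by omega
      rw [h4, h5, List.drop_succ_cons]
      simp
    · have h1 : i ∉ [a, b] := by simp; omega
      simp only [rmv, if_neg h1]
      rw [ih (i+1) a b (by omega) hab (by simp at hbb ⊢; omega)]
      have h2 : a - i = (a - (i+1)) + 1 := by omega
      have h4 : b - i + 1 = (b - (i+1) + 1) + 1 := by omega
      rw [h2, h4, List.take_succ_cons, List.drop_succ_cons, List.drop_succ_cons]
      simp

-- under the balanced-prefix condition the scan never pops an empty stack
theorem mscan_total (rest : List Char) : ∀ (i : Nat) (st : List Nat) (acc : List (Nat × Nat)),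
    (∀ p : List Char, p.IsPrefix rest → p.count ')' ≤ st.length + p.count '(') →
    ∃ out, mscan rest i st acc [] = some out := by
  induction rest with
  | nil => intro i st acc _; exact ⟨(st, acc), rfl⟩
  | cons c rest ih =>
    intro i st acc hbal
    simp only [mscan, List.not_mem_nil, if_neg (fun h => h : ¬False)]
    by_cases hc : c = '('
    · rw [if_pos hc]
      refine ih (i+1) (i :: st) acc ?_
      intro p hp
      have := hbal (c :: p) (List.cons_prefix_cons.mpr ⟨rfl, hp⟩)
      subst hc
      simp at this ⊢
      omega
    · by_cases hc2 : c = ')'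
      · rw [if_neg hc, if_pos hc2]
        match st with
        | [] =>
          exfalso
          have := hbal [c] ⟨rest, rfl⟩
          subst hc2
          simp at this
        | v :: st' =>
          simp only
          refine ih (i+1) st' (acc ++ [(v, i)]) ?_
          intro p hp
          have := hbal (c :: p) (List.cons_prefix_cons.mpr ⟨rfl, hp⟩)
          subst hc2
          simp [hc] at this ⊢
          omega
      · rw [if_neg hc, if_neg hc2]
        refine ih (i+1) st acc ?_
        intro p hp
        have := hbal (c :: p) (List.cons_prefix_cons.mpr ⟨rfl, hp⟩)
        simp [hc, hc2] at this ⊢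
        omega

-- the string A builds by slicing out the matched pair (l, i) of s
def mkTmp (s : String) (l i : Nat) : String :=
  String.ofList (PySem.List.slice s.toList (some 0) (some (l : Int)) ++
    PySem.List.slice s.toList (some ((l : Int) + 1)) (some (i : Int)) ++
    PySem.List.slice s.toList (some ((i : Int) + 1)) (some (PySem.List.len s.toList)))

-- the dedup-and-enqueue fold A's inner loop performs on the emitted pairs
def foldTmp (s : String) (prs : List (Nat × Nat)) (qd : List String × PySem.Set String) :
    List String × PySem.Set String :=
  prs.foldl (fun qd pr =>
    if PySem.Set.contains qd.2 (mkTmp s pr.1 pr.2) then qd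
    else (qd.1 ++ [mkTmp s pr.1 pr.2], PySem.Set.add qd.2 (mkTmp s pr.1 pr.2))) qd

theorem set_add_eq {α : Type} [BEq α] [LawfulBEq α] (s : PySem.Set α) (x : α) :
    PySem.Set.add s x = if x ∈ s then s else s ++ [x] := by
  have h : PySem.Set.add s x = if PySem.Set.contains s x then s else s ++ [x] := rfl
  rw [h]
  by_cases hx : x ∈ s
  · rw [if_pos ((PySem.Set.contains_iff s x).mpr hx), if_pos hx]
  · rw [if_neg (fun hc => hx ((PySem.Set.contains_iff s x).mp hc)), if_neg hx]

-- A's inner loop factors into a plain scan followed by the enqueue fold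
theorem solveInner_eq (s : String) (rest : List Char) : ∀ (i : Nat) (st : List Nat)
    (q : List String) (d : PySem.Set String),
    solveInner s rest i st q d =
      (mscan rest i st [] []).map (fun r => (r.1, foldTmp s r.2 (q, d))) := by
  induction rest with
  | nil => intro i st q d; simp [solveInner, mscan, foldTmp]
  | cons c rest ih =>
    intro i st q d
    simp only [solveInner, mscan, List.not_mem_nil, if_neg (fun h => h : ¬False)]
    by_cases hc : c = '('
    · rw [if_pos hc, if_pos hc]
      exact ih (i+1) (i :: st) q d
    · by_cases hc2 : c = ')'
      · rw [if_neg hc, if_pos hc2, if_neg hc, if_pos hc2]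
        match st with
        | [] => rfl
        | l :: st' =>
          simp only
          have hfold : String.ofList (PySem.List.slice s.toList (some 0) (some (l : Int)) ++
              PySem.List.slice s.toList (some ((l : Int) + 1)) (some (i : Int)) ++
              PySem.List.slice s.toList (some ((i : Int) + 1)) (some (PySem.List.len s.toList))) =
              mkTmp s l i := rfl
          rw [hfold]
          rw [mscan_acc rest (i+1) st' ([] ++ [(l, i)]) []]
          by_cases hmem : PySem.Set.contains d (mkTmp s l i)
          · rw [if_pos (by exact hmem)]
            rw [ih (i+1) st' q d]
            cases mscan rest (i+1) st' [] [] with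
            | none => rfl
            | some r =>
              simp only [Option.map_some, Option.some.injEq, Prod.mk.injEq, List.nil_append]
              refine ⟨by trivial, ?_⟩
              show foldTmp s r.2 (q, d) = foldTmp s ((l, i) :: r.2) (q, d)
              simp only [foldTmp, List.foldl_cons]
              rw [if_pos hmem]
          · rw [if_neg (by exact hmem)]
            rw [ih (i+1) st' (q ++ [mkTmp s l i]) (PySem.Set.add d (mkTmp s l i))]
            cases mscan rest (i+1) st' [] [] with
            | none => rfl
            | some r =>
              simp only [Option.map_some, Option.some.injEq, Prod.mk.injEq, List.nil_append]
              refine ⟨by trivial, ?_⟩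
              show foldTmp s r.2 (q ++ [mkTmp s l i], PySem.Set.add d (mkTmp s l i)) =
                foldTmp s ((l, i) :: r.2) (q, d)
              simp only [foldTmp, List.foldl_cons]
              rw [if_neg hmem]
      · rw [if_neg hc, if_neg hc2, if_neg hc, if_neg hc2]
        exact ih (i+1) st q d

-- what the enqueue fold does: it appends the same fresh strings to q and d
theorem foldTmp_ext (s : String) (prs : List (Nat × Nat)) : ∀ (q : List String)
    (d : PySem.Set String),
    ∃ ext, foldTmp s prs (q, d) = (q ++ ext, d ++ ext) ∧
      (∀ t ∈ ext, ∃ pr ∈ prs, t = mkTmp s pr.1 pr.2) ∧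
      (∀ pr ∈ prs, mkTmp s pr.1 pr.2 ∈ d ++ ext) ∧
      (d.Nodup → (d ++ ext).Nodup) := by
  induction prs with
  | nil => intro q d; exact ⟨[], by simp [foldTmp], by simp, by simp, by simp⟩
  | cons pr prs ih =>
    intro q d
    by_cases hmem : PySem.Set.contains d (mkTmp s pr.1 pr.2)
    · rcases ih q d with ⟨ext, heq, hsrc, hall, hnd⟩
      refine ⟨ext, ?_, ?_, ?_, hnd⟩
      · simp only [foldTmp, List.foldl_cons, if_pos hmem]
        exact heq
      · intro t ht
        rcases hsrc t ht with ⟨pr', hpr', ht'⟩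
        exact ⟨pr', List.mem_cons_of_mem pr hpr', ht'⟩
      · intro pr' hpr'
        rcases List.mem_cons.mp hpr' with h1 | h1
        · subst h1
          exact List.mem_append.mpr (Or.inl ((PySem.Set.contains_iff d _).mp hmem))
        · exact hall pr' h1
    · have hnotmem : mkTmp s pr.1 pr.2 ∉ d :=
        fun hx => hmem ((PySem.Set.contains_iff d _).mpr hx)
      have hadd : PySem.Set.add d (mkTmp s pr.1 pr.2) = d ++ [mkTmp s pr.1 pr.2] := by
        rw [set_add_eq, if_neg hnotmem]
      rcases ih (q ++ [mkTmp s pr.1 pr.2]) (PySem.Set.add d (mkTmp s pr.1 pr.2)) with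
        ⟨ext, heq, hsrc, hall, hnd⟩
      refine ⟨mkTmp s pr.1 pr.2 :: ext, ?_, ?_, ?_, ?_⟩
      · simp only [foldTmp, List.foldl_cons, if_neg hmem]
        show foldTmp s prs (q ++ [mkTmp s pr.1 pr.2], PySem.Set.add d (mkTmp s pr.1 pr.2)) = _
        rw [heq, hadd]
        simp
      · intro t ht
        rcases List.mem_cons.mp ht with h1 | h1
        · exact ⟨pr, List.mem_cons_self, h1⟩
        · rcases hsrc t h1 with ⟨pr', hpr', ht'⟩
          exact ⟨pr', List.mem_cons_of_mem pr hpr', ht'⟩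
      · intro pr' hpr'
        rcases List.mem_cons.mp hpr' with h1 | h1
        · subst h1; simp
        · have := hall pr' h1
          rw [hadd] at this
          simpa [List.append_assoc] using this
      · intro hdn
        have h1 : (PySem.Set.add d (mkTmp s pr.1 pr.2)).Nodup := PySem.Set.nodup_add d _ hdn
        have := hnd h1
        rw [hadd] at this
        simpa [List.append_assoc] using this

-- index blocks of distinct pairs are disjoint when the flattened marks are nodup
theorem marks_disj (P : List (Nat × Nat)) (h : (marks P).Nodup) :
    ∀ p ∈ P, ∀ q ∈ P, p ≠ q → ∀ x, (x = p.1 ∨ x = p.2) → ¬(x = q.1 ∨ x = q.2) := by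
  induction P with
  | nil => intro p hp; simp at hp
  | cons a P ih =>
    intro p hp q hq hpq x hx hx2
    have hm : marks (a :: P) = a.1 :: a.2 :: marks P := rfl
    rw [hm] at h
    have h1 := List.nodup_cons.mp h
    have h2 := List.nodup_cons.mp h1.2
    have ha1 : a.1 ∉ marks P := by
      intro hmem; exact h1.1 (List.mem_cons_of_mem _ hmem)
    have ha2 : a.2 ∉ marks P := h2.1
    rcases List.mem_cons.mp hp with hpa | hpP
    · rcases List.mem_cons.mp hq with hqa | hqP
      · exact hpq (hpa.trans hqa.symm)
      · have hxq : x ∈ marks P := mem_marks.mpr ⟨q, hqP, by tauto⟩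
        subst hpa
        rcases hx with h3 | h3
        · exact ha1 (h3 ▸ hxq)
        · exact ha2 (h3 ▸ hxq)
    · rcases List.mem_cons.mp hq with hqa | hqP
      · have hxp : x ∈ marks P := mem_marks.mpr ⟨p, hpP, by tauto⟩
        subst hqa
        rcases hx2 with h3 | h3
        · exact ha1 (h3 ▸ hxp)
        · exact ha2 (h3 ▸ hxp)
      · exact ih h2.2 p hpP q hqP hpq x hx hx2

theorem sh_zero (I : List Nat) : sh I 0 = 0 := by
  simp [sh]

-- processing the string of a sublist S appends exactly the (deduplicated) strings
-- of the one-pair extensions of S to both the queue and the discovered set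
theorem process (start : String) (stF0 : List Nat) (P0 : List (Nat × Nat))
    (h0 : mscan start.toList 0 [] [] [] = some (stF0, P0))
    (hm : (marks P0).Nodup)
    (S : List (Nat × Nat)) (hS : S.Sublist P0)
    (s : String) (hs : s = fS start.toList S)
    (st0 : List Nat) (q : List String) (d : PySem.Set String) :
    ∃ st' ext,
      solveInner s s.toList 0 st0 q d = some (st', q ++ ext, d ++ ext) ∧
      (∀ t ∈ ext, ∃ p ∈ P0, p ∉ S ∧ t = fS start.toList (p :: S)) ∧
      (∀ p ∈ P0, p ∉ S → fS start.toList (p :: S) ∈ d ++ ext) ∧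
      (d.Nodup → (d ++ ext).Nodup) := by
  have hP0n : P0.Nodup := nodup_of_marks_nodup P0 hm
  have hmSn : (marks S).Nodup := List.Nodup.sublist (hS.flatMap _) hm
  have hSsub : ∀ x ∈ marks S, x ∈ marks P0 := fun x hx => (hS.flatMap _).subset hx
  -- marks of a pair outside S avoid marks S
  have hdisj : ∀ p ∈ P0, p ∉ S → p.1 ∉ marks S ∧ p.2 ∉ marks S := by
    intro p hp hpS
    have hgen : ∀ x, (x = p.1 ∨ x = p.2) → x ∉ marks S := by
      intro x hx hmem
      rcases mem_marks.mp hmem with ⟨qq, hqq, hxq⟩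
      exact marks_disj P0 hm p hp qq (hS.subset hqq) (fun hh => hpS (hh ▸ hqq)) x hx hxq
    exact ⟨hgen p.1 (Or.inl rfl), hgen p.2 (Or.inr rfl)⟩
  have hms := mscan_marks_sublist start.toList stF0 P0 h0 hm S hS
  have hshift := mscan_shift start.toList 0 [] [] (marks S) stF0
    (P0.filter (fun p => p ∉ S)) hmSn hms
  rw [sh_zero] at hshift
  simp only [List.map_nil] at hshift
  have hts : s.toList = rmv start.toList 0 (marks S) := by
    rw [hs]; simp [fS]
  have hstale := mscan_stale (rmv start.toList 0 (marks S)) 0 [] st0 [] []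
    (stF0.map (sh (marks S)), (P0.filter (fun p => p ∉ S)).map
      (fun p => (sh (marks S) p.1, sh (marks S) p.2))) hshift
  simp only [List.nil_append] at hstale
  have hinner := solveInner_eq s s.toList 0 st0 q d
  rw [hts] at hinner
  rw [hstale] at hinner
  simp only [Option.map_some] at hinner
  -- the fold over the emitted (shifted) pairs
  rcases foldTmp_ext s ((P0.filter (fun p => p ∉ S)).map
      (fun p => (sh (marks S) p.1, sh (marks S) p.2))) q d with ⟨ext, heq, hsrc, hall, hnd⟩
  -- each emitted pair builds exactly the string of the one-pair extension
  have hkey : ∀ p ∈ P0, p ∉ S →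
      mkTmp s (sh (marks S) p.1) (sh (marks S) p.2) = fS start.toList (p :: S) := by
    intro p hp hpS
    have hd := hdisj p hp hpS
    have hplr : p.1 < p.2 := by
      rcases mscan_mem start.toList 0 [] [] [] stF0 P0 h0 (by simp) p hp with h1 | h2
      · simp at h1
      · exact h2.2.2.2.1
    have hab : sh (marks S) p.1 < sh (marks S) p.2 :=
      sh_mono (marks S) hmSn p.1 p.2 hplr hd.1
    have hbb : sh (marks S) p.2 < (rmv start.toList 0 (marks S)).length := by
      rcases mscan_mem (rmv start.toList 0 (marks S)) 0 [] [] []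
        (stF0.map (sh (marks S))) _ hshift (by simp)
        (sh (marks S) p.1, sh (marks S) p.2)
        (List.mem_map.mpr ⟨p, List.mem_filter.mpr ⟨hp, by simpa using hpS⟩, rfl⟩) with h1 | h2
      · simp at h1
      · simpa using h2.2.2.2.2
    set a := sh (marks S) p.1 with ha
    set b := sh (marks S) p.2 with hbdef
    set s' := rmv start.toList 0 (marks S) with hs'
    have htake : PySem.List.slice s.toList (some 0) (some (a : Int)) = s'.take a := by
      rw [hts, PySem.List.slice_zero_start, PySem.List.slice_to_natCast]
    have hmid : PySem.List.slice s.toList (some ((a : Int) + 1)) (some (b : Int)) =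
        (s'.drop (a+1)).take (b - (a+1)) := by
      rw [hts]
      have : ((a : Int) + 1) = ((a + 1 : Nat) : Int) := by push_cast; ring
      rw [this, PySem.List.slice_natCast]
    have hlast : PySem.List.slice s.toList (some ((b : Int) + 1))
        (some (PySem.List.len s.toList)) = s'.drop (b+1) := by
      rw [hts]
      have h1 : ((b : Int) + 1) = ((b + 1 : Nat) : Int) := by push_cast; ring
      have h2 : PySem.List.len s' = ((s'.length : Nat) : Int) := by
        simp [PySem.List.len_eq]
      rw [h1, h2, PySem.List.slice_natCast]
      exact List.take_of_length_le (by simp)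
    have hrp : rmv s' 0 [a, b] = s'.take a ++ ((s'.drop (a+1)).take (b - a - 1)) ++
        s'.drop (b+1) := by
      have := rmv_pair s' 0 a b (by omega) hab (by omega)
      simpa using this
    have hcomp : rmv s' 0 [a, b] = rmv start.toList 0 (marks (p :: S)) := by
      have h1 : [a, b] = [p.1, p.2].map (sh (marks S)) := by simp [ha, hbdef]
      have h2 : marks (p :: S) = [p.1, p.2] ++ marks S := rfl
      rw [h1, h2, hs']
      have hrr := rmv_rmv start.toList 0 (marks S) [p.1, p.2] hmSn
        (by intro x hx; simp at hx; rcases hx with h | h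
            · exact h ▸ hd.1
            · exact h ▸ hd.2)
      rw [sh_zero] at hrr
      exact hrr
    rw [mkTmp, htake, hmid, hlast]
    have hba : b - (a + 1) = b - a - 1 := by omega
    rw [hba, ← hrp, hcomp]
    rfl
  refine ⟨stF0.map (sh (marks S)) ++ st0, ext, ?_, ?_, ?_, hnd⟩
  · rw [hts, hinner, heq]
  · intro t ht
    rcases hsrc t ht with ⟨pr, hpr, hteq⟩
    rcases List.mem_map.mp hpr with ⟨p, hpf, hpeq⟩
    have hpP0 := (List.mem_filter.mp hpf).1
    have hpS : p ∉ S := by simpa using (List.mem_filter.mp hpf).2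
    refine ⟨p, hpP0, hpS, ?_⟩
    rw [hteq, ← hpeq]
    exact hkey p hpP0 hpS
  · intro p hpP0 hpS
    have := hall (sh (marks S) p.1, sh (marks S) p.2)
      (List.mem_map.mpr ⟨p, List.mem_filter.mpr ⟨hpP0, by simpa using hpS⟩, rfl⟩)
    rwa [hkey p hpP0 hpS] at this

theorem fS_perm (cs : List Char) (S1 S2 : List (Nat × Nat)) (h : S1.Perm S2) :
    fS cs S1 = fS cs S2 := by
  unfold fS
  rw [rmv_congr cs 0 (marks S1) (marks S2)]
  intro x _
  constructor
  · intro hx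
    rcases mem_marks.mp hx with ⟨p, hp, hxe⟩
    exact mem_marks.mpr ⟨p, h.mem_iff.mp hp, hxe⟩
  · intro hx
    rcases mem_marks.mp hx with ⟨p, hp, hxe⟩
    exact mem_marks.mpr ⟨p, h.mem_iff.mpr hp, hxe⟩

theorem dlen_le (start : String) (P0 : List (Nat × Nat)) (d : PySem.Set String)
    (hn : d.Nodup) (hrep : ∀ t ∈ d, ∃ S, S.Sublist P0 ∧ t = fS start.toList S) :
    d.length ≤ 2 ^ P0.length := by
  have hsub : d ⊆ P0.sublists.map (fS start.toList) := by
    intro t ht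
    rcases hrep t ht with ⟨S, hS, hts⟩
    exact List.mem_map.mpr ⟨S, List.mem_sublists.mpr hS, hts.symm⟩
  have := (hn.subperm hsub).length_le
  simpa [List.length_sublists] using this

-- the BFS worklist loop: with enough fuel it returns the set of all strings of
-- sublists reachable from the current state, and that set is step-closed
theorem solveLoop_spec (start : String) (stF0 : List Nat) (P0 : List (Nat × Nat))
    (h0 : mscan start.toList 0 [] [] [] = some (stF0, P0))
    (hm : (marks P0).Nodup) :
    ∀ (fuel : Nat) (st0 : List Nat) (q : List String) (d : PySem.Set String),
    (∀ t ∈ d, ∃ S, S.Sublist P0 ∧ t = fS start.toList S) →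
    (∀ t ∈ q, t ∈ d) →
    d.Nodup →
    (∀ t ∈ d, t ∈ q ∨ ∀ S, S.Sublist P0 → t = fS start.toList S →
        ∀ p ∈ P0, p ∉ S → fS start.toList (p :: S) ∈ d) →
    q.length + 2 ^ P0.length + 1 ≤ fuel + d.length →
    ∃ d', solveLoop fuel st0 q d = some d' ∧
      (∀ t ∈ d, t ∈ d') ∧
      (∀ t ∈ d', ∃ S, S.Sublist P0 ∧ t = fS start.toList S) ∧
      (∀ t ∈ d', ∀ S, S.Sublist P0 → t = fS start.toList S →
        ∀ p ∈ P0, p ∉ S → fS start.toList (p :: S) ∈ d') ∧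
      d'.Nodup := by
  intro fuel
  induction fuel with
  | zero =>
    intro st0 q d hrep hqd hnd _ hfuel
    exfalso
    have := dlen_le start P0 d hnd hrep
    omega
  | succ fuel ih =>
    intro st0 q d hrep hqd hnd hclosed hfuel
    match q, hqd, hclosed, hfuel with
    | [], _, hclosed, _ =>
      refine ⟨d, rfl, fun t ht => ht, hrep, ?_, hnd⟩
      intro t ht S hS hts p hp hpS
      rcases hclosed t ht with h1 | h1
      · simp at h1
      · exact h1 S hS hts p hp hpS
    | s :: q', hqd, hclosed, hfuel =>
      have hsd : s ∈ d := hqd s List.mem_cons_self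
      rcases hrep s hsd with ⟨S, hS, hseq⟩
      rcases process start stF0 P0 h0 hm S hS s hseq st0 q' d with
        ⟨st', ext, heq, hsrc, hall, hnd'⟩
      simp only [solveLoop]
      rw [heq]
      have hP0n : P0.Nodup := nodup_of_marks_nodup P0 hm
      -- invariants for the recursive call
      have hrep' : ∀ t ∈ d ++ ext, ∃ S', S'.Sublist P0 ∧ t = fS start.toList S' := by
        intro t ht
        rcases List.mem_append.mp ht with h1 | h1
        · exact hrep t h1
        · rcases hsrc t h1 with ⟨p, hp, hpS, hteq⟩
          rcases sublist_insert P0 S p hp hS hpS with ⟨S2, hsub2, hperm2⟩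
          exact ⟨S2, hsub2, hteq.trans (fS_perm start.toList (p :: S) S2 hperm2.symm)⟩
      have hqd' : ∀ t ∈ q' ++ ext, t ∈ d ++ ext := by
        intro t ht
        rcases List.mem_append.mp ht with h1 | h1
        · exact List.mem_append.mpr (Or.inl (hqd t (List.mem_cons_of_mem s h1)))
        · exact List.mem_append.mpr (Or.inr h1)
      have hclosed' : ∀ t ∈ d ++ ext, t ∈ q' ++ ext ∨
          ∀ S', S'.Sublist P0 → t = fS start.toList S' →
            ∀ p ∈ P0, p ∉ S' → fS start.toList (p :: S') ∈ d ++ ext := by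
        intro t ht
        rcases List.mem_append.mp ht with h1 | h1
        · by_cases hts : t = s
          · subst hts
            refine Or.inr ?_
            intro S' hS' hteq p hp hpS'
            rcases process start stF0 P0 h0 hm S' hS' t hteq st0 q' d with
              ⟨st'2, ext2, heq2, _, hall2, _⟩
            have hexteq : ext2 = ext := by
              rw [heq] at heq2
              have h3 := Option.some.inj heq2
              have h4 := congrArg (fun x => x.2.1) h3
              exact (List.append_cancel_left h4).symm
            rw [hexteq] at hall2
            exact hall2 p hp hpS'
          · rcases hclosed t h1 with h2 | h2
            · rcases List.mem_cons.mp h2 with h3 | h3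
              · exact absurd h3 hts
              · exact Or.inl (List.mem_append.mpr (Or.inl h3))
            · refine Or.inr ?_
              intro S' hS' hteq p hp hpS'
              exact List.mem_append.mpr (Or.inl (h2 S' hS' hteq p hp hpS'))
        · exact Or.inl (List.mem_append.mpr (Or.inr h1))
      have hfuel' : (q' ++ ext).length + 2 ^ P0.length + 1 ≤ fuel + (d ++ ext).length := by
        simp only [List.length_append, List.length_cons] at hfuel ⊢
        omega
      rcases ih st' (q' ++ ext) (d ++ ext) hrep' hqd' (hnd' hnd) hclosed' hfuel' with
        ⟨d', hloop, hmono, hrep'', hclosed'', hnd''⟩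
      refine ⟨d', hloop, ?_, hrep'', hclosed'', hnd''⟩
      intro t ht
      exact hmono t (List.mem_append.mpr (Or.inl ht))

-- a step-closed set containing the start string contains every sublist string
theorem closure_all (start : String) (P0 : List (Nat × Nat)) (hP0n : P0.Nodup)
    (d' : PySem.Set String)
    (hclosed : ∀ t ∈ d', ∀ S, S.Sublist P0 → t = fS start.toList S →
      ∀ p ∈ P0, p ∉ S → fS start.toList (p :: S) ∈ d')
    (hstart : fS start.toList [] ∈ d') :
    ∀ S, S.Sublist P0 → fS start.toList S ∈ d' := by
  intro S
  induction S with
  | nil => intro _; exact hstart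
  | cons p S' ih =>
    intro hS
    have hS' : S'.Sublist P0 := List.sublist_of_cons_sublist hS
    have hmem := ih hS'
    have hpS' : p ∉ S' := (List.nodup_cons.mp (List.Nodup.sublist hS hP0n)).1
    exact hclosed (fS start.toList S') hmem S' hS' rfl p (hS.subset List.mem_cons_self) hpS'

-- ---- B side ----

theorem altScan_eq (rest : List Char) : ∀ (i : Nat) (st : List Nat) (acc : List (Nat × Nat)),
    altScan rest i st acc = (mscan rest i st acc []).map (fun r => r.2) := by
  induction rest with
  | nil => intro i st acc; simp [altScan, mscan]
  | cons c rest ih =>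
    intro i st acc
    simp only [altScan, mscan, List.not_mem_nil, if_neg (fun h => h : ¬False)]
    by_cases hc : c = '('
    · rw [if_pos hc, if_pos hc]; exact ih (i+1) (i :: st) acc
    · by_cases hc2 : c = ')'
      · rw [if_neg hc, if_pos hc2, if_neg hc, if_pos hc2]
        match st with
        | [] => rfl
        | l :: st' => exact ih (i+1) st' (acc ++ [(l, i)])
      · rw [if_neg hc, if_neg hc2, if_neg hc, if_neg hc2]; exact ih (i+1) st acc

theorem altJoin_eq_rmv (rest : List Char) : ∀ (j : Nat) (R : PySem.Set Nat),
    altJoin rest j R = rmv rest j R := by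
  induction rest with
  | nil => intro j R; rfl
  | cons c rest ih =>
    intro j R
    by_cases hj : j ∈ R
    · rw [altJoin, if_pos ((PySem.Set.contains_iff R j).mpr hj), rmv, if_pos hj]
      exact ih (j+1) R
    · rw [altJoin, if_neg (fun hc => hj ((PySem.Set.contains_iff R j).mp hc)), rmv, if_neg hj]
      rw [ih (j+1) R]

-- the sub-collection of pairs selected by the bits of mask
def selectPairs (mask : Int) : List (Nat × Nat) → Nat → List (Nat × Nat)
  | [], _ => []
  | p :: rest, k =>
    if PySem.Int.band (mask >>> k) 1 ≠ 0 then p :: selectPairs mask rest (k+1)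
    else selectPairs mask rest (k+1)

theorem selectPairs_sublist (mask : Int) : ∀ (l : List (Nat × Nat)) (k : Nat),
    (selectPairs mask l k).Sublist l := by
  intro l
  induction l with
  | nil => intro k; simp [selectPairs]
  | cons p rest ih =>
    intro k
    by_cases hb : PySem.Int.band (mask >>> k) 1 ≠ 0
    · rw [selectPairs, if_pos hb]; exact (ih (k+1)).cons_cons p
    · rw [selectPairs, if_neg hb]; exact List.sublist_cons_of_sublist p (ih (k+1))

theorem altRemoved_mem (mask : Int) : ∀ (l : List (Nat × Nat)) (k : Nat)
    (rem : PySem.Set Nat) (j : Nat),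
    j ∈ altRemoved mask l k rem ↔ j ∈ rem ∨ j ∈ marks (selectPairs mask l k) := by
  intro l
  induction l with
  | nil => intro k rem j; simp [altRemoved, selectPairs, marks]
  | cons p rest ih =>
    intro k rem j
    by_cases hb : PySem.Int.band (mask >>> k) 1 ≠ 0
    · rw [altRemoved, if_pos hb, selectPairs, if_pos hb]
      rw [ih (k+1)]
      have hmm : marks (p :: selectPairs mask rest (k+1)) =
          p.1 :: p.2 :: marks (selectPairs mask rest (k+1)) := rfl
      rw [hmm]
      rw [PySem.Set.mem_add, PySem.Set.mem_add]
      simp only [List.mem_cons]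
      tauto
    · rw [altRemoved, if_neg hb, selectPairs, if_neg hb]
      exact ih (k+1) rem j

theorem bit_natCast (m k : Nat) :
    (PySem.Int.band (((m : Nat) : Int) >>> k) 1 ≠ 0) ↔ m / 2 ^ k % 2 = 1 := by
  rw [← Int.natCast_shiftRight]
  rw [show (1 : Int) = ((1 : Nat) : Int) from rfl]
  rw [PySem.Int.band_natCast]
  rw [Nat.and_one_is_mod, Nat.shiftRight_eq_div_pow]
  simp only [ne_eq, Nat.cast_eq_zero]
  omega

theorem selectPairs_shift (b : Nat) (hb : b < 2) : ∀ (l : List (Nat × Nat)) (m k : Nat),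
    selectPairs ((2 * m + b : Nat) : Int) l (k + 1) = selectPairs ((m : Nat) : Int) l k := by
  intro l
  induction l with
  | nil => intro m k; rfl
  | cons p rest ih =>
    intro m k
    have hbit : (PySem.Int.band (((2 * m + b : Nat) : Int) >>> (k+1)) 1 ≠ 0) ↔
        (PySem.Int.band (((m : Nat) : Int) >>> k) 1 ≠ 0) := by
      rw [bit_natCast, bit_natCast]
      have : (2 * m + b) / 2 ^ (k + 1) = m / 2 ^ k := by
        rw [pow_succ, Nat.mul_comm (2^k) 2]
        rw [← Nat.div_div_eq_div_mul]
        congr 1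
        omega
      rw [this]
    by_cases hx : PySem.Int.band (((m : Nat) : Int) >>> k) 1 ≠ 0
    · rw [selectPairs, if_pos (hbit.mpr hx), selectPairs, if_pos hx, ih m (k+1)]
    · rw [selectPairs, if_neg (fun hc => hx (hbit.mp hc)), selectPairs, if_neg hx]
      exact ih m (k+1)

theorem selectPairs_surj (l : List (Nat × Nat)) : ∀ (S : List (Nat × Nat)), S.Sublist l →
    ∃ m : Nat, m < 2 ^ l.length ∧ (S ≠ [] → 1 ≤ m) ∧ selectPairs ((m : Nat) : Int) l 0 = S := by
  induction l with
  | nil =>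
    intro S hS
    rw [List.sublist_nil] at hS
    exact ⟨0, by simp, by simp [hS], by simp [hS, selectPairs]⟩
  | cons p rest ih =>
    intro S hS
    rcases List.sublist_cons_iff.mp hS with hS1 | ⟨S', rfl, hS'⟩
    · rcases ih S hS1 with ⟨m', hlt, hne, heq⟩
      refine ⟨2 * m', by simp [List.length_cons, pow_succ]; omega, fun hne' => by have := hne hne'; omega, ?_⟩
      rw [show ((2 * m' : Nat) : Int) = ((2 * m' + 0 : Nat) : Int) by norm_num]
      rw [selectPairs]
      rw [if_neg (by rw [bit_natCast]; omega)]
      rw [selectPairs_shift 0 (by omega) rest m' 0]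
      exact heq
    · rcases ih S' hS' with ⟨m', hlt, _, heq⟩
      refine ⟨2 * m' + 1, by simp [List.length_cons, pow_succ]; omega, fun _ => by omega, ?_⟩
      rw [selectPairs]
      rw [if_pos (by rw [bit_natCast]; omega)]
      rw [selectPairs_shift 1 (by omega) rest m' 0]
      rw [heq]

theorem no_low_bits_eq_zero : ∀ (n m : Nat), (∀ t < n, m / 2 ^ t % 2 = 0) → m < 2 ^ n → m = 0 := by
  intro n
  induction n with
  | zero => intro m _ h2; simpa using h2
  | succ n ih =>
    intro m hbits hlt
    have h0 : m % 2 = 0 := by have := hbits 0 (by omega); simpa using this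
    have hhalf : m / 2 = 0 := by
      refine ih (m / 2) ?_ ?_
      · intro t ht
        have := hbits (t + 1) (by omega)
        rw [pow_succ, Nat.mul_comm (2^t) 2, ← Nat.div_div_eq_div_mul] at this
        exact this
      · rw [pow_succ] at hlt; omega
    omega

theorem selectPairs_nil_bits (mask : Int) : ∀ (l : List (Nat × Nat)) (k : Nat),
    selectPairs mask l k = [] → ∀ t < l.length, ¬ (PySem.Int.band (mask >>> (k + t)) 1 ≠ 0) := by
  intro l
  induction l with
  | nil => intro k _ t ht; simp at ht
  | cons p rest ih =>
    intro k hsel t ht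
    by_cases hb : PySem.Int.band (mask >>> k) 1 ≠ 0
    · rw [selectPairs, if_pos hb] at hsel; simp at hsel
    · rw [selectPairs, if_neg hb] at hsel
      match t with
      | 0 => simpa using hb
      | t + 1 =>
        have := ih (k+1) hsel t (by simp at ht; omega)
        rw [show k + 1 + t = k + (t + 1) by omega] at this
        exact this

theorem selectPairs_ne_nil (l : List (Nat × Nat)) (m : Nat) (h1 : 1 ≤ m)
    (h2 : m < 2 ^ l.length) : selectPairs ((m : Nat) : Int) l 0 ≠ [] := by
  intro hsel
  have hbits := selectPairs_nil_bits ((m : Nat) : Int) l 0 hsel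
  have : ∀ t < l.length, m / 2 ^ t % 2 = 0 := by
    intro t ht
    have := hbits t ht
    rw [show (0 : Nat) + t = t by omega] at this
    rw [bit_natCast] at this
    omega
  have := no_low_bits_eq_zero l.length m this h2
  omega

theorem mem_foldl_add (g : Int → String) (l : List Int) : ∀ (init : PySem.Set String)
    (t : String), (t ∈ l.foldl (fun s m => PySem.Set.add s (g m)) init) ↔
      t ∈ init ∨ ∃ m ∈ l, t = g m := by
  induction l with
  | nil => intro init t; simp
  | cons a l ih =>
    intro init t
    simp only [List.foldl_cons]
    rw [ih]
    rw [PySem.Set.mem_add]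
    simp only [List.mem_cons]
    constructor
    · intro h
      rcases h with h1 | h1
      · rcases h1 with h2 | h2
        · exact Or.inl h2
        · exact Or.inr ⟨a, Or.inl rfl, h2⟩
      · rcases h1 with ⟨m, hm, hteq⟩
        exact Or.inr ⟨m, Or.inr hm, hteq⟩
    · intro h
      rcases h with h1 | h1
      · exact Or.inl (Or.inl h1)
      · rcases h1 with ⟨m, hm, hteq⟩
        rcases hm with hm | hm
        · exact Or.inl (Or.inr (hm ▸ hteq))
        · exact Or.inr ⟨m, hm, hteq⟩

theorem nodup_foldl_add (g : Int → String) (l : List Int) : ∀ (init : PySem.Set String),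
    init.Nodup → (l.foldl (fun s m => PySem.Set.add s (g m)) init).Nodup := by
  induction l with
  | nil => intro init h; exact h
  | cons a l ih =>
    intro init h
    simp only [List.foldl_cons]
    exact ih _ (PySem.Set.nodup_add init (g a) h)

theorem marks_length (l : List (Nat × Nat)) : (marks l).length = 2 * l.length := by
  induction l with
  | nil => rfl
  | cons p r ih => simp [marks] at ih ⊢; omega

theorem solve_spec : Claim_equal_solve := by
  unfold Claim_equal_solve
  intro start _ hpre
  unfold Spec_solve
  have hbal : ∀ p : List Char, p.IsPrefix start.toList →
      p.count ')' ≤ ([] : List Nat).length + p.count '(' := by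
    intro p hp
    simpa using hpre p ((List.mem_inits p start.toList).mpr hp)
  obtain ⟨out0, h0⟩ := mscan_total start.toList 0 [] [] hbal
  obtain ⟨stF0, P0⟩ := out0
  obtain ⟨hm, hb0⟩ := mscan_wf start.toList 0 [] [] [] stF0 P0 h0
    (by simp) (by simp) (by simp [marks]) (by simp [marks]) (by simp)
  have hb : ∀ x ∈ marks P0, x < start.toList.length := by simpa using hb0
  have hP0n : P0.Nodup := nodup_of_marks_nodup P0 hm
  have hplen : P0.length ≤ start.toList.length := by
    have hsub : marks P0 ⊆ List.range start.toList.length :=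
      fun x hx => List.mem_range.mpr (hb x hx)
    have hle := (hm.subperm hsub).length_le
    rw [List.length_range, marks_length] at hle
    omega
  have hstart_eq : start = fS start.toList [] := by
    simp [fS, marks, rmv_nil]
  have hd0 : PySem.Set.ofList [start] = [start] := rfl
  rcases solveLoop_spec start stF0 P0 h0 hm (2 ^ start.toList.length + 1) [] [start]
      (PySem.Set.ofList [start])
      (by intro t ht; rw [hd0] at ht; simp at ht; subst ht
          exact ⟨[], List.nil_sublist P0, hstart_eq⟩)
      (by intro t ht; rw [hd0]; exact ht)
      (by rw [hd0]; exact List.nodup_singleton start)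
      (by intro t ht; rw [hd0] at ht; simp at ht; subst ht; exact Or.inl List.mem_cons_self)
      (by rw [hd0]
          have h2 : 2 ^ P0.length ≤ 2 ^ start.toList.length :=
            Nat.pow_le_pow_right (by omega) hplen
          simp only [List.length_cons, List.length_nil]
          omega)
    with ⟨d', hloopeq, hmono, hrep', hclosed', hnd'⟩
  have hstart_mem : start ∈ d' := hmono start (by rw [hd0]; exact List.mem_cons_self)
  have hmem_iff : ∀ t, t ∈ d' ↔ ∃ S, S.Sublist P0 ∧ t = fS start.toList S := by
    intro t
    constructor
    · exact hrep' t
    · rintro ⟨S, hS, rfl⟩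
      exact closure_all start P0 hP0n d' hclosed' (hstart_eq ▸ hstart_mem) S hS
  -- the length of a nonempty-sublist string is strictly smaller: it cannot be start
  have hlen_lt : ∀ S : List (Nat × Nat), S.Sublist P0 → S ≠ [] →
      fS start.toList S ≠ start := by
    intro S hS hne heq
    obtain ⟨p, S', rfl⟩ : ∃ p S', S = p :: S' := by
      cases S with
      | nil => exact absurd rfl hne
      | cons p S' => exact ⟨p, S', rfl⟩
    have hp1 : p.1 ∈ marks (p :: S') := mem_marks.mpr ⟨p, List.mem_cons_self, Or.inl rfl⟩
    have hp1b : p.1 < start.toList.length := by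
      refine hb p.1 ((hS.flatMap _).subset hp1)
    have hlt := rmv_length_lt start.toList 0 (marks (p :: S')) p.1 hp1 (by omega) (by omega)
    have htl : (fS start.toList (p :: S')).toList = rmv start.toList 0 (marks (p :: S')) := by
      simp [fS]
    have := congrArg (fun s => s.toList.length) heq
    simp only [htl] at this
    omega
  -- A's result
  have hrm : PySem.Set.remove? d' start = some (PySem.Set.discard d' start) := by
    unfold PySem.Set.remove?
    rw [if_pos ((PySem.Set.contains_iff d' start).mpr hstart_mem)]
  unfold solve
  simp only [hloopeq, hrm]
  -- B's result
  have halt : altScan start.toList 0 [] [] = some P0 := by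
    rw [altScan_eq, h0]
    rfl
  unfold solve_alt
  simp only [halt]
  -- both are sorted lists of equal finite sets
  have hshift1 : ((1 : Int) <<< P0.length) = ((2 ^ P0.length : Nat) : Int) := by
    simp [Int.shiftLeft_eq]
  have hg : ∀ mask : Int,
      String.ofList (altJoin start.toList 0 (altRemoved mask P0 0 PySem.Set.empty)) =
        fS start.toList (selectPairs mask P0 0) := by
    intro mask
    rw [altJoin_eq_rmv]
    unfold fS
    congr 1
    refine rmv_congr start.toList 0 _ _ ?_
    intro x _
    rw [altRemoved_mem mask P0 0 PySem.Set.empty x]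
    simp [PySem.Set.empty]
  refine PySem.List.sorted_eq_sorted_of_perm _ _ (fun x => x) (fun a b h => h) ?_
  refine (List.perm_ext_iff_of_nodup (PySem.Set.nodup_discard d' start hnd') ?_).mpr ?_
  · exact nodup_foldl_add _ _ PySem.Set.empty (by simp [PySem.Set.empty])
  · intro t
    rw [PySem.Set.mem_discard]
    rw [mem_foldl_add (fun mask =>
      String.ofList (altJoin start.toList 0 (altRemoved mask P0 0 PySem.Set.empty)))
      (PySem.List.pyRange 1 ((1 : Int) <<< P0.length) 1) PySem.Set.empty t]
    constructor
    · rintro ⟨hmem, hne⟩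
      rcases (hmem_iff t).mp hmem with ⟨S, hS, rfl⟩
      have hSne : S ≠ [] := by
        intro hSnil
        subst hSnil
        exact hne (hstart_eq.symm)
      rcases selectPairs_surj P0 S hS with ⟨m, hmlt, hm1, hsel⟩
      refine Or.inr ⟨((m : Nat) : Int), ?_, ?_⟩
      · rw [PySem.List.mem_pyRange_one, hshift1]
        constructor
        · exact_mod_cast hm1 hSne
        · exact_mod_cast hmlt
      · rw [hg, hsel]
    · rintro (h1 | ⟨mask, hmask, rfl⟩)
      · simp [PySem.Set.empty] at h1
      · rw [PySem.List.mem_pyRange_one, hshift1] at hmask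
        obtain ⟨hm1, hm2⟩ := hmask
        have hmask0 : 0 ≤ mask := by omega
        have hmeq : mask = ((mask.toNat : Nat) : Int) := (Int.toNat_of_nonneg hmask0).symm
        have hm1' : 1 ≤ mask.toNat := by omega
        have hm2' : mask.toNat < 2 ^ P0.length := by omega
        rw [hg]
        have hSsub := selectPairs_sublist mask P0 0
        have hSne : selectPairs mask P0 0 ≠ [] := by
          rw [hmeq]
          exact selectPairs_ne_nil P0 mask.toNat hm1' hm2'
        constructor
        · exact (hmem_iff _).mpr ⟨selectPairs mask P0 0, hSsub, rfl⟩
        · exact hlen_lt (selectPairs mask P0 0) hSsub hSne
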